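-- pv_equiv track=rewrite | github.com/jsvul/jsvul | filter_datasets/util/statistics.py | _url_to_save
-- ===== SOURCE A (Python) =====
-- def _url_to_save(url):
--     url_parts = url.split("/")
--     result = ""
--     for part in url_parts:
--         if part not in ["commit", "commits", "pull"] and not result:
--             continue
--
--         result += f"/{part}"
--
--     return result
-- ===== SOURCE B (Python) =====
-- def _url_to_save(url):
--     join_all = ""
--     ans = ""
--     for part in reversed(url.split("/")):
--         join_all = "/" + part + join_all
--         if part in ("commit", "commits", "pull"):
--             ans = join_all
--     return ans
-- ===== Notes on version B (the rewrite author's own statement) =====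
-- stated objective: alternative
-- what changed: Replaces the forward flag-accumulator scan with a single backward pass that builds the full slash-joined suffix back-to-front and overwrites the answer with it at every keyword, so the final answer is the join from the leftmost keyword with no emptiness flag, early return or slicing.
import Mathlib
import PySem

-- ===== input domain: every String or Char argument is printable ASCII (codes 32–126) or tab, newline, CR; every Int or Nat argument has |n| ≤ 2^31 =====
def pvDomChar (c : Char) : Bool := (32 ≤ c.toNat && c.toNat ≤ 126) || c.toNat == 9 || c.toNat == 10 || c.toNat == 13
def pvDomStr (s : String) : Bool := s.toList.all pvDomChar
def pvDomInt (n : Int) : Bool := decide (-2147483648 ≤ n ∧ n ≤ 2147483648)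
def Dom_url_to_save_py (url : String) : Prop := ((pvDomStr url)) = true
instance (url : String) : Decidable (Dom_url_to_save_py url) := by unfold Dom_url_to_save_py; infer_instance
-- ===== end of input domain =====

-- B rebuilds the result in one BACKWARD pass (pair accumulator: joined suffix + current answer, overwritten at each keyword) instead of A's forward empty-flag accumulation; same cost, different traversal.

-- ===== PORT A =====
-- ported over List Char (exact): url.split("/") is Chars.splitOn; 'not result' is result.isEmpty; f"/{part}" is '/' :: part
def url_to_save_py (url : String) : String :=
  String.ofList ((PySem.Chars.splitOn url.toList ['/']).foldl
    (fun result part =>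
      if (!(part == "commit".toList || part == "commits".toList || part == "pull".toList))
          && result.isEmpty then
        result
      else
        result ++ ('/' :: part)) [])

-- ===== PORT B =====
-- Source B's backward loop: foldl over the REVERSED part list with the pair state (join_all, ans)
def url_to_save_py_alt (url : String) : String :=
  String.ofList (((PySem.Chars.splitOn url.toList ['/']).reverse.foldl
    (fun (st : List Char × List Char) part =>
      let ja := '/' :: part ++ st.1
      (ja, if part == "commit".toList || part == "commits".toList || part == "pull".toList then ja else st.2))
    ([], [])).2)

-- ===== PRECONDITION & SPEC =====
def Spec_url_to_save_py (url : String) (out : String) : Prop := out = url_to_save_py_alt url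
instance (url : String) (out : String) : Decidable (Spec_url_to_save_py url out) := by unfold Spec_url_to_save_py; infer_instance

-- ===== CLAIM (what is proved, stated in full; the proofs are below) =====
def Claim_equal_url_to_save_py : Prop := ∀ (url : String), Dom_url_to_save_py url → Spec_url_to_save_py url (url_to_save_py url)

-- ===== LEMMAS AND PROOFS =====
-- common specification recursion: the joined parts from the first keyword on
def urlFind : List (List Char) → List Char
  | [] => []
  | p :: rest =>
    if p == "commit".toList || p == "commits".toList || p == "pull".toList then
      ((p :: rest).map (fun q => '/' :: q)).flatten
    else
      urlFind rest

-- once the accumulator is nonempty, A's fold appends every remaining part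
theorem url_foldl_nonempty (l : List (List Char)) (acc : List Char) (h : acc ≠ []) :
    l.foldl (fun result part =>
      if (!(part == "commit".toList || part == "commits".toList || part == "pull".toList))
          && result.isEmpty then
        result
      else
        result ++ ('/' :: part)) acc
    = acc ++ (l.map (fun q => '/' :: q)).flatten := by
  induction l generalizing acc with
  | nil => simp
  | cons p rest ih =>
    simp only [List.foldl_cons]
    have hne : acc.isEmpty = false := by simpa [List.isEmpty_iff] using h
    rw [show (if (!(p == "commit".toList || p == "commits".toList || p == "pull".toList))
          && acc.isEmpty then acc else acc ++ ('/' :: p)) = acc ++ ('/' :: p) by simp [hne]]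
    rw [ih (acc ++ ('/' :: p)) (by simp)]
    simp

-- from the empty accumulator, A's fold computes exactly the find-then-join specification
theorem url_foldl_eq_find (l : List (List Char)) :
    l.foldl (fun result part =>
      if (!(part == "commit".toList || part == "commits".toList || part == "pull".toList))
          && result.isEmpty then
        result
      else
        result ++ ('/' :: part)) []
    = urlFind l := by
  induction l with
  | nil => simp [urlFind]
  | cons p rest ih =>
    by_cases hk : (p == "commit".toList || p == "commits".toList || p == "pull".toList) = true
    · rw [List.foldl_cons]
      rw [show (if (!(p == "commit".toList || p == "commits".toList || p == "pull".toList))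
            && List.isEmpty ([] : List Char) then ([] : List Char) else [] ++ ('/' :: p))
          = '/' :: p by rw [hk]; rfl]
      rw [url_foldl_nonempty rest ('/' :: p) (by simp)]
      conv_rhs => rw [urlFind, hk]
      simp
    · simp only [Bool.not_eq_true] at hk
      rw [List.foldl_cons]
      rw [show (if (!(p == "commit".toList || p == "commits".toList || p == "pull".toList))
            && List.isEmpty ([] : List Char) then ([] : List Char) else [] ++ ('/' :: p))
          = [] by rw [hk]; rfl]
      rw [ih]
      conv_rhs => rw [urlFind, hk]
      rfl

-- B's backward pass, read as a foldr, maintains (join of the suffix, answer for the suffix)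
theorem url_backward_eq_find (l : List (List Char)) :
    l.foldr (fun part (st : List Char × List Char) =>
      let ja := '/' :: part ++ st.1
      (ja, if part == "commit".toList || part == "commits".toList || part == "pull".toList then ja else st.2))
      ([], [])
    = ((l.map (fun q => '/' :: q)).flatten, urlFind l) := by
  induction l with
  | nil => simp [urlFind]
  | cons p rest ih =>
    simp only [List.foldr_cons, ih]
    by_cases hk : (p == "commit".toList || p == "commits".toList || p == "pull".toList) = true
    · simp [urlFind, hk]
    · simp only [Bool.not_eq_true] at hk
      simp [urlFind, hk, Prod.ext_iff]

-- ===== VERDICT (by name: the statement is the Claim_ definition above) =====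
theorem url_to_save_py_spec : Claim_equal_url_to_save_py := by
  intro url _
  unfold Spec_url_to_save_py url_to_save_py url_to_save_py_alt
  rw [List.foldl_reverse, url_foldl_eq_find, url_backward_eq_find]
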